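-- pv_equiv track=rewrite | github.com/MariaBlancoGonzalez/PraderWilli-Rehab | src/stats/calc.py | sumar_valores_misma_fecha_diag
-- ===== SOURCE A (Python) =====
-- def sumar_valores_misma_fecha_diag(fechas, errores, aciertos, errores_d, aciertos_d, tiempo):
--     fechas_sumadas = []
--     errores_sumados = []
--     aciertos_sumados = []
--     errores_sumados_d = []
--     aciertos_sumados_d = []
--     tiempo_sumado = []
--
--     valores_sumados = {}
--
--     for i in range(len(fechas)):
--         fecha = fechas[i]
--         valor_tiempo = tiempo[i]
--
--         clave = (fecha, valor_tiempo)
--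
--         if clave in valores_sumados:
--             valores_sumados[clave][0] += errores[i]
--             valores_sumados[clave][1] += aciertos[i]
--             valores_sumados[clave][2] += errores_d[i]
--             valores_sumados[clave][3] += aciertos_d[i]
--         else:
--             valores_sumados[clave] = [errores[i], aciertos[i], errores_d[i], aciertos_d[i]]
--
--     for clave, valores in valores_sumados.items():
--         fecha, valor_tiempo = clave
--
--         fechas_sumadas.append(fecha)
--         errores_sumados.append(valores[0])
--         aciertos_sumados.append(valores[1])
--         errores_sumados_d.append(valores[2])
--         aciertos_sumados_d.append(valores[3])
--         tiempo_sumado.append(valor_tiempo)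
--
--     return fechas_sumadas, errores_sumados, aciertos_sumados, errores_sumados_d, aciertos_sumados_d, tiempo_sumado
-- ===== SOURCE B (Python) =====
-- def sumar_valores_misma_fecha_diag(fechas, errores, aciertos, errores_d, aciertos_d, tiempo):
--     n = len(fechas)
--     claves = [(fechas[i], tiempo[i]) for i in range(n)]
--     firsts = [i for i in range(n) if claves[i] not in claves[:i]]
--     return (
--         [fechas[i] for i in firsts],
--         [sum(errores[j] for j in range(n) if claves[j] == claves[i]) for i in firsts],
--         [sum(aciertos[j] for j in range(n) if claves[j] == claves[i]) for i in firsts],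
--         [sum(errores_d[j] for j in range(n) if claves[j] == claves[i]) for i in firsts],
--         [sum(aciertos_d[j] for j in range(n) if claves[j] == claves[i]) for i in firsts],
--         [tiempo[i] for i in firsts],
--     )
-- ===== Notes on version B (the rewrite author's own statement) =====
-- stated objective: alternative
-- what changed: B drops the dictionary entirely: it first collects the first-occurrence indices of each (fecha, tiempo) key by prefix scans, then computes each output sum with a fresh whole-list scan per distinct key, building the six result lists as comprehensions.
import Mathlib
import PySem

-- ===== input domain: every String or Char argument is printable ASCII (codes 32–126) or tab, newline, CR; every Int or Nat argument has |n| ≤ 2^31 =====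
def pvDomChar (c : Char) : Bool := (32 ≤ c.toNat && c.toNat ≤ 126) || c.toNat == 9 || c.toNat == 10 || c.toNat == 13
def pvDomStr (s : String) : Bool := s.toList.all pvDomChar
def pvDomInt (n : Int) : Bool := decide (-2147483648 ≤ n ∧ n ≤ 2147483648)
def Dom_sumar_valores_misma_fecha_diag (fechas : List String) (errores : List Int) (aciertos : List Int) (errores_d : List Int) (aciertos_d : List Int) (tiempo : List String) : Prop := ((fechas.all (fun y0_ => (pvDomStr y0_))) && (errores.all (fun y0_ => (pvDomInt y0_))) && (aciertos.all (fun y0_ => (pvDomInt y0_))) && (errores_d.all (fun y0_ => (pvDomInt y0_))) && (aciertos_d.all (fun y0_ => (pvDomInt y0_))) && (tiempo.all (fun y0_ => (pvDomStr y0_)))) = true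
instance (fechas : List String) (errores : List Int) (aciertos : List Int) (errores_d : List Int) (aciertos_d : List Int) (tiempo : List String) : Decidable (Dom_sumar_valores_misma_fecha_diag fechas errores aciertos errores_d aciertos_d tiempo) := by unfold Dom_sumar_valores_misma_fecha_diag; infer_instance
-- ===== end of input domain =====

-- B drops A's dictionary entirely: it lists the first-occurrence indices of each (fecha, tiempo)
-- key by prefix scans and computes every output sum by a fresh whole-list scan (objective:
-- alternative — declarative, dict-free; not faster).

-- ===== PORT A =====
-- list indexing xs[i] with i ∈ range(len(fechas)): exact under Pre_ (every index in range;
-- where a parallel list is shorter Python raises IndexError, excluded by Pre_)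
def pvGetS (xs : List String) (i : Nat) : String := xs.getD i ""
def pvGetI (xs : List Int) (i : Nat) : Int := xs.getD i 0

-- Python's 4-element value list [e, a, ed, ad] is ported as a 4-tuple; the in-place
-- `d[clave][k] += x` updates become a read-modify-write reinsert at the same key.
def stepA (fechas : List String) (errores : List Int) (aciertos : List Int) (errores_d : List Int) (aciertos_d : List Int) (tiempo : List String) (d : PySem.Dict (String × String) (Int × Int × Int × Int)) (i : Nat) : PySem.Dict (String × String) (Int × Int × Int × Int) :=
  let clave := (pvGetS fechas i, pvGetS tiempo i)
  match d.get? clave with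
  | some v => d.insert clave (v.1 + pvGetI errores i, v.2.1 + pvGetI aciertos i, v.2.2.1 + pvGetI errores_d i, v.2.2.2 + pvGetI aciertos_d i)
  | none => d.insert clave (pvGetI errores i, pvGetI aciertos i, pvGetI errores_d i, pvGetI aciertos_d i)

def sumar_valores_misma_fecha_diag (fechas : List String) (errores : List Int) (aciertos : List Int) (errores_d : List Int) (aciertos_d : List Int) (tiempo : List String) : List String × List Int × List Int × List Int × List Int × List String :=
  let valores_sumados := (List.range fechas.length).foldl (stepA fechas errores aciertos errores_d aciertos_d tiempo) PySem.Dict.empty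
  valores_sumados.items.foldl
    (fun acc p =>
      (acc.1 ++ [p.1.1], acc.2.1 ++ [p.2.1], acc.2.2.1 ++ [p.2.2.1], acc.2.2.2.1 ++ [p.2.2.2.1], acc.2.2.2.2.1 ++ [p.2.2.2.2], acc.2.2.2.2.2 ++ [p.1.2]))
    ([], [], [], [], [], [])

-- ===== PORT B =====
-- Source B line by line: `claves` is the key list, `firsts` the indices whose key is not in the
-- prefix claves[:i], and each output is a comprehension over `firsts`; `sum(xs[j] for j in
-- range(n) if claves[j] == claves[i])` is the foldl over the filtered range. claves[i] is read
-- with getD: inside `firsts`/the sums the index is always < n = len(claves), so it is exact.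
def sumar_valores_misma_fecha_diag_alt (fechas : List String) (errores : List Int) (aciertos : List Int) (errores_d : List Int) (aciertos_d : List Int) (tiempo : List String) : List String × List Int × List Int × List Int × List Int × List String :=
  let n := fechas.length
  let claves := (List.range n).map (fun i => (pvGetS fechas i, pvGetS tiempo i))
  let firsts := (List.range n).filter (fun i => !((claves.take i).contains (claves.getD i ("", ""))))
  ( firsts.map (fun i => pvGetS fechas i),
    firsts.map (fun i => ((List.range n).filter (fun j => claves.getD j ("", "") == claves.getD i ("", ""))).foldl (fun s j => s + pvGetI errores j) 0),
    firsts.map (fun i => ((List.range n).filter (fun j => claves.getD j ("", "") == claves.getD i ("", ""))).foldl (fun s j => s + pvGetI aciertos j) 0),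
    firsts.map (fun i => ((List.range n).filter (fun j => claves.getD j ("", "") == claves.getD i ("", ""))).foldl (fun s j => s + pvGetI errores_d j) 0),
    firsts.map (fun i => ((List.range n).filter (fun j => claves.getD j ("", "") == claves.getD i ("", ""))).foldl (fun s j => s + pvGetI aciertos_d j) 0),
    firsts.map (fun i => pvGetS tiempo i) )

-- ===== PRECONDITION & SPEC =====
-- Pre_ = exactly the inputs where A returns: each parallel list is at least as long as fechas
-- (otherwise Python A raises IndexError at fechas[i]'s companions).
def Pre_sumar_valores_misma_fecha_diag (fechas : List String) (errores : List Int) (aciertos : List Int) (errores_d : List Int) (aciertos_d : List Int) (tiempo : List String) : Prop :=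
  fechas.length ≤ errores.length ∧ fechas.length ≤ aciertos.length ∧ fechas.length ≤ errores_d.length ∧ fechas.length ≤ aciertos_d.length ∧ fechas.length ≤ tiempo.length
instance (fechas : List String) (errores : List Int) (aciertos : List Int) (errores_d : List Int) (aciertos_d : List Int) (tiempo : List String) : Decidable (Pre_sumar_valores_misma_fecha_diag fechas errores aciertos errores_d aciertos_d tiempo) := by unfold Pre_sumar_valores_misma_fecha_diag; infer_instance

def pvWitness_sumar_valores_misma_fecha_diag : List String × List Int × List Int × List Int × List Int × List String :=
  (["2024-01-01", "2024-01-02", "2024-01-01"], [1, 2, 3], [4, 5, 6], [7, 8, 9], [10, 11, 12], ["30", "30", "30"])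

def Spec_sumar_valores_misma_fecha_diag (fechas : List String) (errores : List Int) (aciertos : List Int) (errores_d : List Int) (aciertos_d : List Int) (tiempo : List String) (out : List String × List Int × List Int × List Int × List Int × List String) : Prop := out = sumar_valores_misma_fecha_diag_alt fechas errores aciertos errores_d aciertos_d tiempo
instance (fechas : List String) (errores : List Int) (aciertos : List Int) (errores_d : List Int) (aciertos_d : List Int) (tiempo : List String) (out : List String × List Int × List Int × List Int × List Int × List String) : Decidable (Spec_sumar_valores_misma_fecha_diag fechas errores aciertos errores_d aciertos_d tiempo out) := by unfold Spec_sumar_valores_misma_fecha_diag; infer_instance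

-- ===== CLAIM (what is proved, stated in full; the proofs are below) =====
def Claim_equal_sumar_valores_misma_fecha_diag : Prop := ∀ (fechas : List String) (errores : List Int) (aciertos : List Int) (errores_d : List Int) (aciertos_d : List Int) (tiempo : List String), Dom_sumar_valores_misma_fecha_diag fechas errores aciertos errores_d aciertos_d tiempo → Pre_sumar_valores_misma_fecha_diag fechas errores aciertos errores_d aciertos_d tiempo → Spec_sumar_valores_misma_fecha_diag fechas errores aciertos errores_d aciertos_d tiempo (sumar_valores_misma_fecha_diag fechas errores aciertos errores_d aciertos_d tiempo)

-- ===== LEMMAS AND PROOFS =====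

-- proof-side vocabulary: the key at index i, "i is a first occurrence", the first occurrences
-- below m, and the sum of xs over the indices below m carrying key k
def pvClave (fechas tiempo : List String) (i : Nat) : String × String := (pvGetS fechas i, pvGetS tiempo i)
def pvIsFirst (fechas tiempo : List String) (i : Nat) : Bool := !((List.range i).any (fun j => pvClave fechas tiempo j == pvClave fechas tiempo i))
def pvFirsts (fechas tiempo : List String) (m : Nat) : List Nat := (List.range m).filter (pvIsFirst fechas tiempo)
def pvSum (fechas tiempo : List String) (xs : List Int) (k : String × String) (m : Nat) : Int :=
  ((List.range m).filter (fun j => pvClave fechas tiempo j == k)).foldl (fun s j => s + pvGetI xs j) 0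
def pvVals (fechas tiempo : List String) (errores aciertos errores_d aciertos_d : List Int) (m : Nat) (k : String × String) : Int × Int × Int × Int :=
  (pvSum fechas tiempo errores k m, pvSum fechas tiempo aciertos k m, pvSum fechas tiempo errores_d k m, pvSum fechas tiempo aciertos_d k m)

theorem pvSum_succ (fechas tiempo : List String) (xs : List Int) (k : String × String) (m : Nat) :
    pvSum fechas tiempo xs k (m + 1) =
      if pvClave fechas tiempo m == k then pvSum fechas tiempo xs k m + pvGetI xs m else pvSum fechas tiempo xs k m := by
  unfold pvSum
  rw [List.range_succ, List.filter_append]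
  by_cases h : pvClave fechas tiempo m == k
  · simp [h]
  · simp [h]

theorem pvSum_eq_zero (fechas tiempo : List String) (xs : List Int) (m : Nat)
    (h : (List.range m).any (fun j => pvClave fechas tiempo j == pvClave fechas tiempo m) = false) :
    pvSum fechas tiempo xs (pvClave fechas tiempo m) m = 0 := by
  unfold pvSum
  have hf : (List.range m).filter (fun j => pvClave fechas tiempo j == pvClave fechas tiempo m) = [] := by
    apply List.filter_eq_nil_iff.mpr
    intro j hj
    have := List.any_eq_false.mp h j hj
    simp_all
  rw [hf]; rfl

theorem pvFirsts_succ (fechas tiempo : List String) (m : Nat) :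
    pvFirsts fechas tiempo (m + 1) = pvFirsts fechas tiempo m ++ (if pvIsFirst fechas tiempo m then [m] else []) := by
  unfold pvFirsts
  rw [List.range_succ, List.filter_append]
  by_cases h : pvIsFirst fechas tiempo m <;> simp [h]

-- a key occurs among the first occurrences below m iff it occurs at all below m
theorem any_firsts_eq (fechas tiempo : List String) (k : String × String) :
    ∀ m : Nat, ((pvFirsts fechas tiempo m).any (fun i => pvClave fechas tiempo i == k))
             = ((List.range m).any (fun i => pvClave fechas tiempo i == k)) := by
  intro m
  induction m with
  | zero => rfl
  | succ m ih =>
      rw [pvFirsts_succ, List.range_succ, List.any_append, List.any_append, ih]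
      by_cases hF : pvIsFirst fechas tiempo m = true
      · simp [hF]
      · have hany : (List.range m).any (fun j => pvClave fechas tiempo j == pvClave fechas tiempo m) = true := by
          unfold pvIsFirst at hF; simpa using hF
        obtain ⟨j, hj, hjk⟩ := List.any_eq_true.mp hany
        rw [if_neg hF]
        by_cases hk : pvClave fechas tiempo m == k
        · have h1 : (List.range m).any (fun i => pvClave fechas tiempo i == k) = true := by
            apply List.any_eq_true.mpr
            exact ⟨j, hj, by rw [eq_of_beq hjk]; exact hk⟩
          simp [h1]
        · simp [hk]

-- lookup in a dict whose entries are (key, a function of that key)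
theorem get?_mk_keyed {V : Type} (l : List Nat) (f : Nat → String × String) (G : String × String → V) (k : String × String) :
    (PySem.Dict.mk (l.map (fun i => (f i, G (f i))))).get? k
      = if l.any (fun i => f i == k) then some (G k) else none := by
  induction l with
  | nil => rfl
  | cons a t ih =>
      rw [List.map_cons, PySem.Dict.get?_mk_cons, List.any_cons]
      by_cases h : f a == k
      · rw [if_pos h, eq_of_beq h, if_pos (by simp)]
      · rw [if_neg (by simpa using h), ih]
        simp [h]

-- the invariant: A's dict after the first m loop iterations is exactly the first-occurrence
-- keys, each paired with B's prefix sums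
theorem invA (fechas tiempo : List String) (errores aciertos errores_d aciertos_d : List Int) :
    ∀ m : Nat, (List.range m).foldl (stepA fechas errores aciertos errores_d aciertos_d tiempo) PySem.Dict.empty
      = PySem.Dict.mk ((pvFirsts fechas tiempo m).map
          (fun i => (pvClave fechas tiempo i, pvVals fechas tiempo errores aciertos errores_d aciertos_d m (pvClave fechas tiempo i)))) := by
  intro m
  induction m with
  | zero => rfl
  | succ m ih =>
      rw [List.range_succ, List.foldl_append, List.foldl_cons, List.foldl_nil, ih]
      simp only [stepA]
      have hkey : (pvGetS fechas m, pvGetS tiempo m) = pvClave fechas tiempo m := rfl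
      rw [hkey]
      have hg := get?_mk_keyed (pvFirsts fechas tiempo m) (pvClave fechas tiempo)
        (pvVals fechas tiempo errores aciertos errores_d aciertos_d m) (pvClave fechas tiempo m)
      rw [any_firsts_eq] at hg
      by_cases hF : pvIsFirst fechas tiempo m = true
      · -- unseen key: append
        have hany : (List.range m).any (fun j => pvClave fechas tiempo j == pvClave fechas tiempo m) = false := by
          unfold pvIsFirst at hF; simpa using hF
        rw [hany] at hg
        simp only [Bool.false_eq_true, if_false] at hg
        simp only [hg]
        have hc : (PySem.Dict.mk ((pvFirsts fechas tiempo m).map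
            (fun i => (pvClave fechas tiempo i, pvVals fechas tiempo errores aciertos errores_d aciertos_d m (pvClave fechas tiempo i))))).contains (pvClave fechas tiempo m) = false := by
          rw [PySem.Dict.contains_eq_isSome_get?, hg]; rfl
        apply PySem.Dict.ext
        rw [PySem.Dict.items_insert_of_not_contains _ _ hc]
        show _ ++ _ = ((pvFirsts fechas tiempo (m+1)).map _)
        rw [pvFirsts_succ, if_pos hF, List.map_append]
        congr 1
        · -- old entries keep their sums: the new index's key differs from every old key
          apply List.map_congr_left
          intro i hi
          have him : i ∈ List.range m := List.mem_of_mem_filter hi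
          have hne : (pvClave fechas tiempo i == pvClave fechas tiempo m) = false := by
            simpa using List.any_eq_false.mp hany i him
          have hne' : (pvClave fechas tiempo m == pvClave fechas tiempo i) = false := by
            rw [Bool.beq_comm]; exact hne
          unfold pvVals
          rw [pvSum_succ, pvSum_succ, pvSum_succ, pvSum_succ, if_neg (by simp [hne']),
              if_neg (by simp [hne']), if_neg (by simp [hne']), if_neg (by simp [hne'])]
        · -- the new entry's sums reduce to the single new element
          unfold pvVals
          rw [List.map_cons, List.map_nil,
              pvSum_succ, pvSum_succ, pvSum_succ, pvSum_succ, if_pos (by simp), if_pos (by simp),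
              if_pos (by simp), if_pos (by simp),
              pvSum_eq_zero _ _ _ _ hany, pvSum_eq_zero _ _ _ _ hany,
              pvSum_eq_zero _ _ _ _ hany, pvSum_eq_zero _ _ _ _ hany]
          simp
      · -- seen key: overwrite in place
        have hany : (List.range m).any (fun j => pvClave fechas tiempo j == pvClave fechas tiempo m) = true := by
          unfold pvIsFirst at hF; simpa using hF
        rw [hany] at hg
        simp only [if_true] at hg
        simp only [hg]
        have hc : (PySem.Dict.mk ((pvFirsts fechas tiempo m).map
            (fun i => (pvClave fechas tiempo i, pvVals fechas tiempo errores aciertos errores_d aciertos_d m (pvClave fechas tiempo i))))).contains (pvClave fechas tiempo m) = true := by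
          rw [PySem.Dict.contains_eq_isSome_get?, hg]; rfl
        apply PySem.Dict.ext
        rw [PySem.Dict.items_insert_of_contains _ _ hc]
        show (((pvFirsts fechas tiempo m).map _).map _) = _
        rw [pvFirsts_succ, if_neg hF, List.append_nil, List.map_map]
        apply List.map_congr_left
        intro i _
        simp only [Function.comp]
        by_cases hik : (pvClave fechas tiempo i == pvClave fechas tiempo m) = true
        · have heq : pvClave fechas tiempo i = pvClave fechas tiempo m := eq_of_beq hik
          rw [if_pos (by simp [heq]), heq]
          unfold pvVals
          rw [pvSum_succ, pvSum_succ, pvSum_succ, pvSum_succ, if_pos (by simp), if_pos (by simp),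
              if_pos (by simp), if_pos (by simp)]
        · have hmi : (pvClave fechas tiempo m == pvClave fechas tiempo i) = false := by
            rw [Bool.beq_comm]; simpa using hik
          rw [if_neg (by simpa using hik)]
          unfold pvVals
          rw [pvSum_succ, pvSum_succ, pvSum_succ, pvSum_succ, if_neg (by simp [hmi]),
              if_neg (by simp [hmi]), if_neg (by simp [hmi]), if_neg (by simp [hmi])]

-- A's emit loop appends the six projections of the items list
theorem emit_eq (l : List ((String × String) × (Int × Int × Int × Int)))
    (acc : List String × List Int × List Int × List Int × List Int × List String) :
    l.foldl (fun acc p =>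
      (acc.1 ++ [p.1.1], acc.2.1 ++ [p.2.1], acc.2.2.1 ++ [p.2.2.1], acc.2.2.2.1 ++ [p.2.2.2.1], acc.2.2.2.2.1 ++ [p.2.2.2.2], acc.2.2.2.2.2 ++ [p.1.2])) acc
    = (acc.1 ++ l.map (fun p => p.1.1), acc.2.1 ++ l.map (fun p => p.2.1), acc.2.2.1 ++ l.map (fun p => p.2.2.1), acc.2.2.2.1 ++ l.map (fun p => p.2.2.2.1), acc.2.2.2.2.1 ++ l.map (fun p => p.2.2.2.2), acc.2.2.2.2.2 ++ l.map (fun p => p.1.2)) := by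
  induction l generalizing acc with
  | nil => simp
  | cons p t ih => simp [List.foldl_cons, ih]

-- B's key list agrees with pvClave below n
theorem claves_getD (fechas tiempo : List String) (n i : Nat) (h : i < n) :
    ((List.range n).map (fun i => (pvGetS fechas i, pvGetS tiempo i))).getD i ("", "") = pvClave fechas tiempo i := by
  rw [List.getD_eq_getElem?_getD, List.getElem?_map, List.getElem?_range h]
  rfl

-- B's `firsts` list is pvFirsts n
theorem firstsB_eq (fechas tiempo : List String) (n : Nat) :
    (List.range n).filter (fun i => !((((List.range n).map (fun i => (pvGetS fechas i, pvGetS tiempo i))).take i).contains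
        (((List.range n).map (fun i => (pvGetS fechas i, pvGetS tiempo i))).getD i ("", ""))))
      = pvFirsts fechas tiempo n := by
  unfold pvFirsts
  apply List.filter_congr
  intro i hi
  have hin : i < n := List.mem_range.mp hi
  rw [claves_getD fechas tiempo n i hin]
  unfold pvIsFirst
  congr 1
  rw [← List.map_take, List.take_range, Nat.min_eq_left (Nat.le_of_lt hin),
      List.contains_eq_any_beq, List.any_map]
  congr 1
  funext j
  simp only [Function.comp]
  exact Bool.beq_comm

-- B's per-key sum is pvSum at the full length
theorem sumB_eq (fechas tiempo : List String) (xs : List Int) (n i : Nat) (h : i < n) :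
    ((List.range n).filter (fun j => ((List.range n).map (fun i => (pvGetS fechas i, pvGetS tiempo i))).getD j ("", "")
        == ((List.range n).map (fun i => (pvGetS fechas i, pvGetS tiempo i))).getD i ("", ""))).foldl (fun s j => s + pvGetI xs j) 0
      = pvSum fechas tiempo xs (pvClave fechas tiempo i) n := by
  unfold pvSum
  congr 1
  apply List.filter_congr
  intro j hj
  rw [claves_getD fechas tiempo n j (List.mem_range.mp hj), claves_getD fechas tiempo n i h]

-- ===== VERDICT (by name: the statement is the Claim_ definition above) =====
theorem sumar_valores_misma_fecha_diag_spec : Claim_equal_sumar_valores_misma_fecha_diag := by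
  intro fechas errores aciertos errores_d aciertos_d tiempo _ _
  simp only [Spec_sumar_valores_misma_fecha_diag, sumar_valores_misma_fecha_diag,
    sumar_valores_misma_fecha_diag_alt]
  rw [invA fechas tiempo errores aciertos errores_d aciertos_d fechas.length, emit_eq,
      firstsB_eq fechas tiempo fechas.length]
  simp only [List.nil_append, List.map_map]
  refine congrArg₂ _ rfl (congrArg₂ _ ?_ (congrArg₂ _ ?_ (congrArg₂ _ ?_ (congrArg₂ _ ?_ rfl)))) <;>
  · apply List.map_congr_left
    intro i hi
    have hi' : i ∈ (List.range fechas.length).filter (pvIsFirst fechas tiempo) := hi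
    have hin : i < fechas.length := List.mem_range.mp (List.mem_of_mem_filter hi')
    rw [sumB_eq fechas tiempo _ fechas.length i hin]
    rfl
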